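-- pv_equiv track=rewrite | github.com/Snowwpanda/adventofcode | adventofcode21/17/17.py | binsearch_ymax
-- ===== SOURCE A (Python) =====
-- def cal_y(start, steps):
--     velo_dist = steps * start
--     gravity = (steps * (steps - 1)) // 2
--     return velo_dist - gravity
--
-- def binsearch_ymax(param, steps):
--     # assuming param negative
--     left = param
--     right = steps
--     while left != right:
--         start = (left + right + 1) // 2
--         if cal_y(start, steps) > param:
--             right = start - 1
--         else:
--             left = start
--     return left
-- ===== SOURCE B (Python) =====
-- def binsearch_ymax(param, steps):
--     # closed form (no loop): largest start with steps*start - steps*(steps-1)//2 <= param,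
--     # clamped to the search interval [param, steps]
--     q = (param + steps * (steps - 1) // 2) // steps
--     return max(param, min(steps, q))
-- ===== Notes on version B (the rewrite author's own statement) =====
-- stated objective: simpler
-- what changed: Replaces the binary search loop by a closed form: the largest start with cal_y(start) <= param is floor((param + steps*(steps-1)/2)/steps), clamped to [param, steps].
-- outside the precondition, e.g. on binsearch_ymax(-3, 0): A returns -3, B raises ZeroDivisionError; on binsearch_ymax(-30, -29): A returns -30, B returns -29
import Mathlib
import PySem

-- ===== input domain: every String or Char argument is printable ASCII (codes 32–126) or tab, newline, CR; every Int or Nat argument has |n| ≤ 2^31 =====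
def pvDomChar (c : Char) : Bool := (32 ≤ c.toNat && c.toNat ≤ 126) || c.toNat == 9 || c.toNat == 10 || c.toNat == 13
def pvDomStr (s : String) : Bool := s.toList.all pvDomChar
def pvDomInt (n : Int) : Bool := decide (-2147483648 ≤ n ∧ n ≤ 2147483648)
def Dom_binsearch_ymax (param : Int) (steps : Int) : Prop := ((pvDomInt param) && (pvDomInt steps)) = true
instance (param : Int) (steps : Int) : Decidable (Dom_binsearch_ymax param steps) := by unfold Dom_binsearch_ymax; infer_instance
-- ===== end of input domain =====

-- B replaces A's binary search loop by a clamped closed-form floor division (proved equal on Pre_).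


-- ===== PORT A =====
def cal_y (start : Int) (steps : Int) : Int :=
  let velo_dist := steps * start
  let gravity := PySem.Int.floordiv (steps * (steps - 1)) 2
  velo_dist - gravity

-- the while loop, fuel-recursive; inside Pre_ the fuel given below always suffices
def binsearch_loop (param steps : Int) : Nat → Int → Int → Int
  | 0, left, _ => left
  | fuel + 1, left, right =>
    if left ≠ right then
      let start := PySem.Int.floordiv (left + right + 1) 2
      if cal_y start steps > param then
        binsearch_loop param steps fuel left (start - 1)
      else
        binsearch_loop param steps fuel start right
    else left

def binsearch_ymax (param : Int) (steps : Int) : Int :=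
  binsearch_loop param steps (steps - param).toNat param steps

-- ===== PORT B =====
def binsearch_ymax_alt (param : Int) (steps : Int) : Int :=
  let q := PySem.Int.floordiv (param + PySem.Int.floordiv (steps * (steps - 1)) 2) steps
  max param (min steps q)

-- ===== PRECONDITION & SPEC =====
-- Pre_ excludes param > steps, where A's while loop never terminates, and steps ≤ 0, where
-- cal_y is not increasing in start so the binary search's value is accidental (and B divides
-- by steps, raising ZeroDivisionError at steps = 0).
def Pre_binsearch_ymax (param : Int) (steps : Int) : Prop := 1 ≤ steps ∧ param ≤ steps
instance (param : Int) (steps : Int) : Decidable (Pre_binsearch_ymax param steps) := by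
  unfold Pre_binsearch_ymax; infer_instance

def pvWitness_binsearch_ymax : Int × Int := (-10, 5)

def Spec_binsearch_ymax (param : Int) (steps : Int) (out : Int) : Prop := out = binsearch_ymax_alt param steps
instance (param : Int) (steps : Int) (out : Int) : Decidable (Spec_binsearch_ymax param steps out) := by unfold Spec_binsearch_ymax; infer_instance

-- ===== CLAIM (what is proved, stated in full; the proofs are below) =====
def Claim_equal_binsearch_ymax : Prop := ∀ (param : Int) (steps : Int), Dom_binsearch_ymax param steps → Pre_binsearch_ymax param steps → Spec_binsearch_ymax param steps (binsearch_ymax param steps)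

-- ===== LEMMAS AND PROOFS =====

-- For 0 < steps, cal_y start steps ≤ param ↔ start ≤ q (the closed-form threshold).
lemma cal_y_le_iff (param steps start : Int) (hs : 0 < steps) :
    cal_y start steps ≤ param ↔
      start ≤ PySem.Int.floordiv (param + PySem.Int.floordiv (steps * (steps - 1)) 2) steps := by
  rw [PySem.Int.le_floordiv_iff_mul_le hs]
  unfold cal_y
  constructor <;> intro h <;> nlinarith [h]

-- Loop invariant: with enough fuel and left ≤ right, the loop returns max left (min right q).
lemma binsearch_loop_eq (param steps : Int) (hs : 0 < steps) :
    ∀ (fuel : Nat) (left right : Int), left ≤ right → (right - left).toNat ≤ fuel →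
      binsearch_loop param steps fuel left right =
        max left (min right (PySem.Int.floordiv (param + PySem.Int.floordiv (steps * (steps - 1)) 2) steps)) := by
  intro fuel
  induction fuel with
  | zero =>
    intro left right hlr hf
    have : left = right := by omega
    subst this
    simp [binsearch_loop]
  | succ n ih =>
    intro left right hlr hf
    set q := PySem.Int.floordiv (param + PySem.Int.floordiv (steps * (steps - 1)) 2) steps with hq
    by_cases heq : left = right
    · subst heq
      simp [binsearch_loop]
    · have hlt : left < right := lt_of_le_of_ne hlr heq
      have hmid : left + 1 ≤ PySem.Int.floordiv (left + right + 1) 2 ∧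
          PySem.Int.floordiv (left + right + 1) 2 ≤ right := by
        rw [PySem.Int.floordiv_eq_ediv_of_pos (by omega : (0:Int) < 2)]
        omega
      rw [binsearch_loop]
      simp only [heq, if_true, ne_eq, not_false_eq_true, if_true]
      set start := PySem.Int.floordiv (left + right + 1) 2 with hstart
      by_cases hcy : cal_y start steps > param
      · have hqlt : q < start := by
          by_contra hcon
          have : cal_y start steps ≤ param := (cal_y_le_iff param steps start hs).2 (by omega)
          omega
        simp only [hcy, if_true]
        rw [ih left (start - 1) (by omega) (by omega)]
        omega
      · have hqge : start ≤ q := (cal_y_le_iff param steps start hs).1 (by omega)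
        simp only [hcy, if_false]
        rw [ih start right (by omega) (by omega)]
        omega

-- ===== VERDICT (by name: the statement is the Claim_ definition above) =====
theorem binsearch_ymax_spec : Claim_equal_binsearch_ymax := by
  intro param steps _ hpre
  obtain ⟨hs, hps⟩ := hpre
  unfold Spec_binsearch_ymax binsearch_ymax binsearch_ymax_alt
  rw [binsearch_loop_eq param steps (by omega) _ param steps hps (by omega)]
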